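-- pv_equiv track=rewrite | github.com/javadsalman/sudoku-algorithm | sudoku-algorithm.py | get_sorted_empty_cols_info
-- ===== SOURCE A (Python) =====
-- def get_possible_numbers(puzzle, row_index, col_index):
--     numbers = set(range(1, 10))
--     numbers.difference_update(puzzle[row_index])
--     numbers.difference_update([row[col_index] for row in puzzle])
--     return tuple(numbers)
--
-- def get_sorted_empty_cols_info(puzzle):
--     cols_info = []
--     for row_index, row in enumerate(puzzle):
--         for col_index, col in enumerate(row):
--             if col == 0:
--                 cols_info.append((row_index, col_index, get_possible_numbers(puzzle, row_index, col_index)))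
--     cols_info.sort(key=lambda col_info: len(col_info[2]))
--     return cols_info
-- ===== SOURCE B (Python) =====
-- def get_sorted_empty_cols_info(puzzle):
--     ncols = max((len(row) for row in puzzle), default=0)
--     colsets = [{row[c] for row in puzzle if c < len(row)} for c in range(ncols)]
--     infos = []
--     for r, row in enumerate(puzzle):
--         rowset = set(row)
--         for c, v in enumerate(row):
--             if v == 0:
--                 infos.append((r, c, tuple(n for n in range(1, 10)
--                                           if n not in rowset and n not in colsets[c])))
--     return [info for k in range(10) for info in infos if len(info[2]) == k]
-- ===== Notes on version B (the rewrite author's own statement) =====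
-- stated objective: alternative
-- what changed: B precomputes one used-value set per column and builds each empty cell's candidates by filtering range(1,10) against it (instead of rebuilding the whole column and differencing sets per empty cell), and replaces the comparison sort by counting passes over the ten possible candidate counts (stable by scan order); it trades per-empty-cell column rebuilds for an upfront per-column pass.
import Mathlib
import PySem

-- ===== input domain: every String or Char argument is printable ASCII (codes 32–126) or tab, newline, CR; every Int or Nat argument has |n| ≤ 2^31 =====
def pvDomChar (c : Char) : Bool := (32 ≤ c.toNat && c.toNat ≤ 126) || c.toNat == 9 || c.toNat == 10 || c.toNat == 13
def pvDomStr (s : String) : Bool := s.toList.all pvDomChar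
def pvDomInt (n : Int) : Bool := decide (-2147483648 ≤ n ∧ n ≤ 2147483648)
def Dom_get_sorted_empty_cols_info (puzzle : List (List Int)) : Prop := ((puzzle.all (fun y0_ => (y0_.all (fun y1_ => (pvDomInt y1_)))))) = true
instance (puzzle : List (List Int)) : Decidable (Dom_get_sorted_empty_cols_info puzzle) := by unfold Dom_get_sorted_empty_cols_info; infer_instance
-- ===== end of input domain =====

-- B replaces A's per-empty-cell column rebuild and set-difference with precomputed column sets and a
-- 1..9 range filter, and replaces the comparison sort with counting passes over the ≤ 10 candidate counts.

-- ===== PORT A =====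
-- set(range(1,10)) iterates ascending in CPython (small ints hash to themselves) and
-- difference_update only removes elements, so tuple(numbers) is the insertion-ordered
-- PySem.Set list 1..9 minus the removed values — exact here.
-- pyGetD's default 0 stands for an IndexError (row too short), excluded by Pre_.
def get_possible_numbers (puzzle : List (List Int)) (row_index col_index : Int) : List Int :=
  let numbers : PySem.Set Int := PySem.Set.ofList (PySem.List.pyRange 1 10 1)
  let numbers := (PySem.List.pyGetD puzzle row_index []).foldl PySem.Set.discard numbers
  let numbers := (puzzle.map (fun row => PySem.List.pyGetD row col_index 0)).foldl PySem.Set.discard numbers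
  numbers

def get_sorted_empty_cols_info (puzzle : List (List Int)) : List (Int × Int × List Int) :=
  let cols_info : List (Int × Int × List Int) :=
    (PySem.List.enumerate puzzle 0).foldl (fun acc rr =>
      (PySem.List.enumerate rr.2 0).foldl (fun acc2 cc =>
        if cc.2 = 0 then acc2 ++ [(rr.1, cc.1, get_possible_numbers puzzle rr.1 cc.1)] else acc2) acc) []
  PySem.List.sorted cols_info (fun ci => PySem.List.len ci.2.2) false

-- ===== PORT B =====
def get_sorted_empty_cols_info_alt (puzzle : List (List Int)) : List (Int × Int × List Int) :=
  let ncols : Int := PySem.List.maxD (puzzle.map (fun row => PySem.List.len row)) (fun x => x) 0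
  let colsets : List (PySem.Set Int) :=
    (PySem.List.pyRange 0 ncols 1).map (fun c =>
      PySem.Set.ofList ((puzzle.filter (fun row => decide (c < PySem.List.len row))).map
        (fun row => PySem.List.pyGetD row c 0)))
  let infos : List (Int × Int × List Int) :=
    (PySem.List.enumerate puzzle 0).foldl (fun acc rr =>
      let rowset : PySem.Set Int := PySem.Set.ofList rr.2
      (PySem.List.enumerate rr.2 0).foldl (fun acc2 cc =>
        if cc.2 = 0 then
          acc2 ++ [(rr.1, cc.1, (PySem.List.pyRange 1 10 1).filter (fun n =>
            !(PySem.Set.contains rowset n) && !(PySem.Set.contains (PySem.List.pyGetD colsets cc.1 []) n)))]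
        else acc2) acc) []
  (PySem.List.pyRange 0 10 1).flatMap (fun k => infos.filter (fun info => decide (PySem.List.len info.2.2 = k)))

-- ===== PRECONDITION & SPEC =====
-- Pre_ excludes exactly the ragged puzzles on which A raises IndexError: some empty (0) cell sits in a
-- column index that exceeds the length of some other row.
def Pre_get_sorted_empty_cols_info (puzzle : List (List Int)) : Prop :=
  ∀ row ∈ puzzle, ∀ c ∈ List.range row.length, row.getD c 1 = 0 → ∀ row2 ∈ puzzle, c < row2.length
instance (puzzle : List (List Int)) : Decidable (Pre_get_sorted_empty_cols_info puzzle) := by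
  unfold Pre_get_sorted_empty_cols_info; infer_instance
def pvWitness_get_sorted_empty_cols_info : List (List Int) := [[0, 1], [2, 0]]

def Spec_get_sorted_empty_cols_info (puzzle : List (List Int)) (out : List (Int × Int × List Int)) : Prop := out = get_sorted_empty_cols_info_alt puzzle
instance (puzzle : List (List Int)) (out : List (Int × Int × List Int)) : Decidable (Spec_get_sorted_empty_cols_info puzzle out) := by unfold Spec_get_sorted_empty_cols_info; infer_instance

-- ===== CLAIM (what is proved, stated in full; the proofs are below) =====
def Claim_equal_get_sorted_empty_cols_info : Prop := ∀ (puzzle : List (List Int)), Dom_get_sorted_empty_cols_info puzzle → Pre_get_sorted_empty_cols_info puzzle → Spec_get_sorted_empty_cols_info puzzle (get_sorted_empty_cols_info puzzle)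

-- ===== LEMMAS AND PROOFS =====

-- removing each element of l from the set s is filtering s by non-membership in l
theorem foldl_discard_eq_filter (l : List Int) (s : PySem.Set Int) :
    l.foldl PySem.Set.discard s = s.filter (fun y => !(l.contains y)) := by
  induction l generalizing s with
  | nil => simp
  | cons x t ih =>
      simp only [List.foldl_cons, ih, PySem.Set.discard, List.filter_filter]
      apply List.filter_congr
      intro a _
      by_cases hx : a = x
      · simp [hx]
      · simp [Bool.and_comm, hx]

-- insertion of x into pre ++ suf when everything in pre stays before x and everything in suf after
theorem insertBy_append (r : α → α → Bool) (x : α) (pre suf : List α)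
    (h1 : ∀ y ∈ pre, r x y = false) (h2 : ∀ y ∈ suf, r x y = true) :
    PySem.List.insertBy r x (pre ++ suf) = pre ++ x :: suf := by
  induction pre with
  | nil =>
      cases suf with
      | nil => simp [PySem.List.insertBy]
      | cons y ys => simp [PySem.List.insertBy, h2 y (by simp)]
  | cons p ps ih =>
      simp only [List.cons_append, PySem.List.insertBy, h1 p (by simp), Bool.false_eq_true,
        if_false]
      simp only [List.cons.injEq, true_and]
      exact ih (fun y hy => h1 y (by simp [hy]))

-- stable sort by an Int key in [0,10) is the concatenation of the ten key-buckets in scan order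
theorem sorted_eq_buckets (L : List α) (key : α → Int)
    (h : ∀ x ∈ L, 0 ≤ key x ∧ key x < 10) :
    PySem.List.sorted L key false =
      (PySem.List.pyRange 0 10 1).flatMap (fun k => L.filter (fun x => decide (key x = k))) := by
  induction L using List.reverseRecOn with
  | nil => simp [PySem.List.sorted]
  | append_singleton L x ih =>
      obtain ⟨hx0, hx10⟩ := h x (by simp)
      have hL : ∀ y ∈ L, 0 ≤ key y ∧ key y < 10 := fun y hy => h y (by simp [hy])
      have hstep : PySem.List.sorted (L ++ [x]) key false =
          PySem.List.insertBy (fun a b => decide (key a < key b)) x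
            (PySem.List.sorted L key false) := by
        simp [PySem.List.sorted, List.foldl_append]
      rw [hstep, ih hL]
      have hsplit : PySem.List.pyRange 0 10 1 =
          PySem.List.pyRange 0 (key x + 1) 1 ++ PySem.List.pyRange (key x + 1) 10 1 :=
        PySem.List.pyRange_one_append 0 (key x + 1) 10 (by omega) (by omega)
      have hsplit0 : PySem.List.pyRange 0 (key x + 1) 1 =
          PySem.List.pyRange 0 (key x) 1 ++ [key x] := by
        rw [PySem.List.pyRange_one_append 0 (key x) (key x + 1) (by omega) (by omega),
          PySem.List.pyRange_one_singleton]
      rw [hsplit]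
      simp only [List.flatMap_append]
      rw [insertBy_append (fun a b => decide (key a < key b)) x _ _
        (by
          intro y hy
          simp only [List.mem_flatMap, List.mem_filter, decide_eq_true_eq,
            PySem.List.mem_pyRange_one] at hy
          obtain ⟨k, ⟨hk0, hk1⟩, _, hky⟩ := hy
          simp only [decide_eq_false_iff_not, not_lt]
          omega)
        (by
          intro y hy
          simp only [List.mem_flatMap, List.mem_filter, decide_eq_true_eq,
            PySem.List.mem_pyRange_one] at hy
          obtain ⟨k, ⟨hk0, hk1⟩, _, hky⟩ := hy
          simp only [decide_eq_true_eq]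
          omega)]
      have elow : (PySem.List.pyRange 0 (key x) 1).flatMap
          (fun k => (L ++ [x]).filter (fun y => decide (key y = k))) =
          (PySem.List.pyRange 0 (key x) 1).flatMap
          (fun k => L.filter (fun y => decide (key y = k))) := by
        apply List.flatMap_congr
        intro k hk
        rw [PySem.List.mem_pyRange_one] at hk
        rw [List.filter_append]
        simp [show ¬ key x = k by omega]
      have ehigh : (PySem.List.pyRange (key x + 1) 10 1).flatMap
          (fun k => (L ++ [x]).filter (fun y => decide (key y = k))) =
          (PySem.List.pyRange (key x + 1) 10 1).flatMap
          (fun k => L.filter (fun y => decide (key y = k))) := by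
        apply List.flatMap_congr
        intro k hk
        rw [PySem.List.mem_pyRange_one] at hk
        rw [List.filter_append]
        simp [show ¬ key x = k by omega]
      rw [ehigh, hsplit0]
      simp only [List.flatMap_append, List.flatMap_cons, List.flatMap_nil, List.append_nil]
      rw [show (PySem.List.pyRange 0 (key x) 1).flatMap
          (fun k => (L ++ [x]).filter (fun y => decide (key y = k))) =
          (PySem.List.pyRange 0 (key x) 1).flatMap
          (fun k => L.filter (fun y => decide (key y = k))) from elow]
      rw [List.filter_append]
      simp [List.append_assoc]

-- a decidable-Prop version of PySem.List.foldl_append_if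
theorem foldl_append_if_prop {α β : Type} (p : α → Prop) [DecidablePred p] (f : α → β)
    (l : List α) (acc : List β) :
    l.foldl (fun acc x => if p x then acc ++ [f x] else acc) acc
      = acc ++ (l.filter (fun x => decide (p x))).map f := by
  have h := PySem.List.foldl_append_if (fun x => decide (p x)) f l acc
  simpa using h

-- both ports' nested append loops flattened to one flatMap
theorem double_loop_flatten {α : Type} (outer : List (Int × List Int))
    (g : (Int × List Int) → (Int × Int) → α) :
    outer.foldl (fun acc rr => (PySem.List.enumerate rr.2 0).foldl
      (fun acc2 cc => if cc.2 = 0 then acc2 ++ [g rr cc] else acc2) acc) [] =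
    outer.flatMap (fun rr =>
      ((PySem.List.enumerate rr.2 0).filter (fun cc => decide (cc.2 = 0))).map (g rr)) := by
  have h : (fun (acc : List α) rr => (PySem.List.enumerate rr.2 0).foldl
      (fun acc2 cc => if cc.2 = 0 then acc2 ++ [g rr cc] else acc2) acc)
      = fun acc rr =>
        acc ++ ((PySem.List.enumerate rr.2 0).filter (fun cc => decide (cc.2 = 0))).map (g rr) := by
    funext acc rr
    exact foldl_append_if_prop _ _ _ _
  rw [h, PySem.List.foldl_append_eq_flatMap]
  simp

theorem set_contains_ofList (xs : List Int) (n : Int) :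
    PySem.Set.contains (PySem.Set.ofList xs) n = xs.contains n := by
  by_cases hn : n ∈ xs
  · simp [PySem.Set.contains, hn, PySem.Set.mem_ofList]
  · simp [PySem.Set.contains, hn, PySem.Set.mem_ofList]

-- the candidate list of an empty in-range cell, A-side vs B-side
theorem cand_eq (puzzle : List (List Int)) (hpre : Pre_get_sorted_empty_cols_info puzzle)
    (r c : Nat) (hr : r < puzzle.length) (hc : c < puzzle[r].length) (h0 : puzzle[r][c] = 0) :
    get_possible_numbers puzzle r c =
      (PySem.List.pyRange 1 10 1).filter (fun n =>
        !(PySem.Set.contains (PySem.Set.ofList puzzle[r]) n) &&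
        !(PySem.Set.contains (PySem.List.pyGetD
            ((PySem.List.pyRange 0
                (PySem.List.maxD (puzzle.map (fun row => PySem.List.len row)) (fun x => x) 0) 1).map
              (fun cc => PySem.Set.ofList
                ((puzzle.filter (fun row => decide (cc < PySem.List.len row))).map
                  (fun row => PySem.List.pyGetD row cc 0)))) c []) n)) := by
  have hallc : ∀ row2 ∈ puzzle, c < row2.length := by
    intro row2 hrow2
    exact hpre puzzle[r] (List.getElem_mem hr) c (List.mem_range.mpr hc)
      (by rw [List.getD_eq_getElem _ _ hc]; exact h0) row2 hrow2
  have hfilter : puzzle.filter (fun row => decide ((c : Int) < PySem.List.len row)) = puzzle := by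
    apply List.filter_eq_self.mpr
    intro row hrow
    simp only [PySem.List.len_eq, decide_eq_true_eq]
    exact_mod_cast hallc row hrow
  have hncols : (c : Int) <
      PySem.List.maxD (puzzle.map (fun row => PySem.List.len row)) (fun x => x) 0 := by
    have hmem : PySem.List.len puzzle[r] ∈ puzzle.map (fun row => PySem.List.len row) :=
      List.mem_map.mpr ⟨puzzle[r], List.getElem_mem hr, rfl⟩
    cases hmax : PySem.List.max? (puzzle.map (fun row => PySem.List.len row)) (fun x => x) with
    | none =>
        rw [PySem.List.max?_eq_none_iff] at hmax
        rw [hmax] at hmem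
        simp at hmem
    | some m =>
        have hle := PySem.List.max?_isMax hmax _ hmem
        have hcl : (c : Int) < PySem.List.len puzzle[r] := by
          rw [PySem.List.len_eq]; exact_mod_cast hc
        simp only [PySem.List.maxD, hmax, Option.getD_some]
        omega
  have hcol : PySem.List.pyGetD
      ((PySem.List.pyRange 0
          (PySem.List.maxD (puzzle.map (fun row => PySem.List.len row)) (fun x => x) 0) 1).map
        (fun cc => PySem.Set.ofList
          ((puzzle.filter (fun row => decide (cc < PySem.List.len row))).map
            (fun row => PySem.List.pyGetD row cc 0)))) (c : Int) [] =
      PySem.Set.ofList (puzzle.map (fun row => PySem.List.pyGetD row (c : Int) 0)) := by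
    rw [PySem.List.pyGetD_map_pyRange_of_nonneg _ _ _ _ (by positivity) hncols, hfilter]
  have hrow : PySem.List.pyGetD puzzle (r : Int) [] = puzzle[r] := by
    simp [PySem.List.pyGetD_natCast, List.getElem?_eq_getElem hr]
  simp only [get_possible_numbers, hrow]
  rw [foldl_discard_eq_filter, foldl_discard_eq_filter,
    PySem.Set.ofList_eq_self_of_nodup _ (PySem.List.nodup_pyRange_one 1 10),
    List.filter_filter, hcol]
  apply List.filter_congr
  intro n _
  rw [set_contains_ofList, set_contains_ofList]
  exact Bool.and_comm _ _

theorem len_filter_range_bound (p : Int → Bool) :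
    0 ≤ PySem.List.len ((PySem.List.pyRange 1 10 1).filter p) ∧
    PySem.List.len ((PySem.List.pyRange 1 10 1).filter p) < 10 := by
  rw [PySem.List.len_eq]
  have h1 := List.length_filter_le p (PySem.List.pyRange 1 10 1)
  have h2 : (PySem.List.pyRange 1 10 1).length = 9 := by decide
  omega

theorem get_sorted_empty_cols_info_spec : Claim_equal_get_sorted_empty_cols_info := by
  intro puzzle _ hpre
  unfold Spec_get_sorted_empty_cols_info
  simp only [get_sorted_empty_cols_info, get_sorted_empty_cols_info_alt]
  rw [double_loop_flatten, double_loop_flatten]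
  have hAB : (PySem.List.enumerate puzzle 0).flatMap (fun rr =>
      ((PySem.List.enumerate rr.2 0).filter (fun cc => decide (cc.2 = 0))).map
        (fun cc => (rr.1, cc.1, get_possible_numbers puzzle rr.1 cc.1))) =
      (PySem.List.enumerate puzzle 0).flatMap (fun rr =>
      ((PySem.List.enumerate rr.2 0).filter (fun cc => decide (cc.2 = 0))).map
        (fun cc => (rr.1, cc.1, (PySem.List.pyRange 1 10 1).filter (fun n =>
          !(PySem.Set.contains (PySem.Set.ofList rr.2) n) &&
          !(PySem.Set.contains (PySem.List.pyGetD
              ((PySem.List.pyRange 0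
                  (PySem.List.maxD (puzzle.map (fun row => PySem.List.len row)) (fun x => x) 0) 1).map
                (fun c => PySem.Set.ofList
                  ((puzzle.filter (fun row => decide (c < PySem.List.len row))).map
                    (fun row => PySem.List.pyGetD row c 0)))) cc.1 []) n))))) := by
    apply List.flatMap_congr
    intro rr hrr
    rw [PySem.List.mem_enumerate_iff] at hrr
    obtain ⟨r, hr, rfl⟩ := hrr
    apply List.map_congr_left
    intro cc hcc
    simp only [List.mem_filter, decide_eq_true_eq] at hcc
    obtain ⟨hcc1, hcc2⟩ := hcc
    rw [PySem.List.mem_enumerate_iff] at hcc1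
    obtain ⟨c, hc, rfl⟩ := hcc1
    simp only [zero_add] at hcc2 ⊢
    have := cand_eq puzzle hpre r c hr hc hcc2
    simp only [this]
  rw [hAB]
  rw [sorted_eq_buckets (α := Int × Int × List Int) _ (fun ci => PySem.List.len ci.2.2)]
  intro x hx
  simp only [List.mem_flatMap, List.mem_map, List.mem_filter] at hx
  obtain ⟨rr, _, cc, _, rfl⟩ := hx
  dsimp only
  exact len_filter_range_bound _
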